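-- pv_equiv track=rewrite | github.com/k-min9/TIL | 00. Daily Algorithm/Programmers/PCCP/1회차_1번.py | solution
-- ===== SOURCE A (Python) =====
-- def solution(input_string):
--     alpha = 'abcdefghijklmnopqrstuvwxyz'
--     for a in alpha:
--         chk = a+a
--         while chk in input_string:
--             input_string = input_string.replace(chk, a)
--
--     chk_set = set()
--     answer_set = set()
--
--     for i in input_string:
--         if i in chk_set:
--             answer_set.add(i)
--         else:
--             chk_set.add(i)
--
--     answers = list(answer_set)
--     answers.sort()
--
--     if answers:
--         answer = ''.join(answers)
--     else:
--         answer = 'N'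
--     return answer
-- ===== SOURCE B (Python) =====
-- def solution(input_string):
--     alpha = 'abcdefghijklmnopqrstuvwxyz'
--     collapsed = []
--     for c in input_string:
--         if collapsed and c == collapsed[-1] and c in alpha:
--             continue
--         collapsed.append(c)
--     counts = {}
--     for c in collapsed:
--         counts[c] = counts.get(c, 0) + 1
--     reps = sorted(c for c, n in counts.items() if n >= 2)
--     return ''.join(reps) if reps else 'N'
-- ===== Notes on version B (the rewrite author's own statement) =====
-- stated objective: alternative
-- what changed: replaces the 26 repeated while-replace scans with one linear pass that skips a lowercase char equal to its predecessor, then one dict counting pass instead of the two-set scan; asymptotically O(n) vs A's worst-case quadratic rescanning, but A's C-level str.replace makes it no faster in wall-clock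
import Mathlib
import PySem

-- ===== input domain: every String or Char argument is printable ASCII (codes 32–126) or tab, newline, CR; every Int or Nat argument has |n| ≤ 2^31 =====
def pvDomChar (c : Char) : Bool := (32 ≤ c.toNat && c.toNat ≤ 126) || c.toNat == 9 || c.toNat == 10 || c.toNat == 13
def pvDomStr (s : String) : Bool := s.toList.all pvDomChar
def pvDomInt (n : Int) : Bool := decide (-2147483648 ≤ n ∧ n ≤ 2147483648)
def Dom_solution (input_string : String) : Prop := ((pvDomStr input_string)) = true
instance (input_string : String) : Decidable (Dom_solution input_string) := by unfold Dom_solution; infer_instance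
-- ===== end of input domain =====

-- B replaces A's 26 repeated while-replace scans by a single linear pass (skip a lowercase char equal to its
-- predecessor) followed by one dict counting pass; objective: alternative (different algorithm, similar cost).

-- ===== PORT A =====
def pvAlphaA : List Char := "abcdefghijklmnopqrstuvwxyz".toList

-- 'while chk in input_string: input_string = input_string.replace(chk, a)'; fuel = current length is a
-- totality guard only (each replace that fires shortens the string, so the Python loop runs < length times).
def pvCollapseA (a : Char) : Nat → List Char → List Char
  | 0, s => s
  | fuel + 1, s =>
    if PySem.Chars.isIn [a, a] s then pvCollapseA a fuel (PySem.Chars.replace s [a, a] [a]) else s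

def solution (input_string : String) : String :=
  let s := pvAlphaA.foldl (fun s a => pvCollapseA a s.length s) input_string.toList
  let p := s.foldl
    (fun (p : PySem.Set Char × PySem.Set Char) i =>
      if PySem.Set.contains p.1 i then (p.1, PySem.Set.add p.2 i) else (PySem.Set.add p.1 i, p.2))
    (PySem.Set.empty, PySem.Set.empty)
  let answers := PySem.List.sorted p.2 (fun x => x) false
  if answers ≠ [] then String.ofList answers else "N"

-- ===== PORT B =====
def pvAlphaB : List Char := "abcdefghijklmnopqrstuvwxyz".toList

def solution_alt (input_string : String) : String :=
  let collapsed := input_string.toList.foldl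
    (fun acc c =>
      if acc ≠ [] ∧ PySem.List.pyGet? acc (-1) = some c ∧ pvAlphaB.contains c then acc
      else acc ++ [c]) []
  let counts := collapsed.foldl (fun d c => d.insert c (d.getD c 0 + 1))
    (PySem.Dict.empty (κ := Char) (ν := Int))
  let reps := PySem.List.sorted ((counts.items.filter (fun p => decide (2 ≤ p.2))).map Prod.fst)
    (fun x => x) false
  if reps ≠ [] then String.ofList reps else "N"

-- ===== PRECONDITION & SPEC =====
def Spec_solution (input_string : String) (out : String) : Prop := out = solution_alt input_string
instance (input_string : String) (out : String) : Decidable (Spec_solution input_string out) := by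
  unfold Spec_solution; infer_instance

-- ===== CLAIM (what is proved, stated in full; the proofs are below) =====
def Claim_equal_solution : Prop := ∀ (input_string : String), Dom_solution input_string → Spec_solution input_string (solution input_string)

-- ===== LEMMAS AND PROOFS =====

def pvRep1 (a : Char) : List Char → List Char
  | [] => []
  | [c] => [c]
  | c :: d :: t => if c = a ∧ d = a then a :: pvRep1 a t else c :: pvRep1 a (d :: t)

theorem pvReplaceGo_eq (a : Char) (fuel : Nat) (l acc : List Char) (h : l.length ≤ fuel) :
    PySem.Chars.replace.go [a, a] [a] fuel l acc = acc.reverse ++ pvRep1 a l := by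
  induction fuel generalizing l acc with
  | zero =>
    have : l = [] := by cases l <;> simp_all
    subst this; simp [PySem.Chars.replace.go, pvRep1]
  | succ fuel ih =>
    match l with
    | [] => simp [PySem.Chars.replace.go, pvRep1]
    | [c] =>
      simp only [PySem.Chars.replace.go]
      have hpre : [a, a].isPrefixOf [c] = false := by simp [List.isPrefixOf]
      rw [hpre]
      simp only [Bool.false_eq_true, if_false]
      rw [ih [] (c :: acc) (Nat.zero_le _)]
      simp [pvRep1]
    | c :: d :: t =>
      simp only [PySem.Chars.replace.go]
      by_cases hc : c = a ∧ d = a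
      · have hpre : [a, a].isPrefixOf (c :: d :: t) = true := by
          simp [List.isPrefixOf, hc.1, hc.2]
        rw [hpre]
        simp only [if_pos trivial]
        rw [show List.drop [a,a].length (c :: d :: t) = t by simp]
        rw [ih t ([a].reverse ++ acc) (by simp at h ⊢; omega)]
        simp [pvRep1, hc.1, hc.2]
      · have hpre : [a, a].isPrefixOf (c :: d :: t) = false := by
          simp [List.isPrefixOf]
          intro h1 h2; exact hc ⟨h1.symm, h2.symm⟩
        rw [hpre]
        simp only [Bool.false_eq_true, if_false]
        rw [ih (d :: t) (c :: acc) (by simp at h ⊢; omega)]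
        simp [pvRep1, hc]

theorem pvReplace_eq_rep1 (a : Char) (s : List Char) :
    PySem.Chars.replace s [a, a] [a] = pvRep1 a s := by
  rw [PySem.Chars.replace]
  simp [pvReplaceGo_eq a s.length s [] le_rfl]

theorem pvRep1_length_lt (a : Char) (l : List Char) (h : [a, a] <:+: l) :
    (pvRep1 a l).length < l.length := by
  fun_induction pvRep1 a l with
  | case1 => simp at h
  | case2 c =>
    exfalso
    obtain ⟨s, t, hst⟩ := h
    have := congrArg List.length hst
    simp at this; omega
  | case3 c d t hc ih =>
    have hle : (pvRep1 a t).length ≤ t.length := by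
      clear h hc ih
      fun_induction pvRep1 a t with
      | case1 => simp
      | case2 => simp
      | case3 c d t hc ih => simp; omega
      | case4 c d t hc ih => simp at ih ⊢; omega
    simp; omega
  | case4 c d t hc ih =>
    simp only [List.length_cons]
    have h' : [a, a] <:+: (d :: t) := by
      rcases (List.infix_cons_iff.mp h) with hp | hs
      · exfalso
        rcases hp with ⟨r, hr⟩
        cases hr
        exact hc ⟨rfl, rfl⟩
      · exact hs
    have := ih h'
    simp at this ⊢; omega

def pvGo (P : Char → Bool) : Option Char → List Char → List Char
  | _, [] => []
  | prev, c :: t => if prev = some c ∧ P c = true then pvGo P prev t else c :: pvGo P (some c) t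

theorem pvGo_rep1 (a : Char) (p : Option Char) (l : List Char) :
    pvGo (fun c => c == a) p (pvRep1 a l) = pvGo (fun c => c == a) p l := by
  fun_induction pvRep1 a l generalizing p with
  | case1 => rfl
  | case2 c => rfl
  | case3 c d t hc ih =>
    rw [hc.1, hc.2]
    by_cases hp : p = some a
    · simp [pvGo, hp, ih]
    · simp [pvGo, hp, ih]
  | case4 c d t hc ih =>
    by_cases hq : p = some c ∧ (c == a) = true
    · simp only [pvGo, if_pos hq]
      exact ih p
    · simp only [pvGo, if_neg hq]
      rw [ih]
      conv_lhs => rw [pvGo]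

theorem pvGo_id_of_not_infix (a : Char) (p : Option Char) (l : List Char)
    (h : ¬ [a, a] <:+: l) (hp : p = some a → l.head? ≠ some a) :
    pvGo (fun c => c == a) p l = l := by
  induction l generalizing p with
  | nil => rfl
  | cons c t ih =>
    have hcond : ¬ (p = some c ∧ (c == a) = true) := by
      rintro ⟨rfl, hca⟩
      have hca' : c = a := by simpa using hca
      exact hp (by rw [hca']) (by simp [hca'])
    simp only [pvGo, if_neg hcond]
    congr 1
    apply ih
    · intro h'
      exact h (h'.trans (List.suffix_cons c t).isInfix)
    · intro hca hta
      apply h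
      injection hca with hca
      cases t with
      | nil => simp at hta
      | cons e t' =>
        simp at hta
        refine List.IsPrefix.isInfix ⟨t', ?_⟩
        simp [hca, hta]

theorem pvCollapseA_eq_go (a : Char) (fuel : Nat) (l : List Char) (h : l.length ≤ fuel) :
    pvCollapseA a fuel l = pvGo (fun c => c == a) none l := by
  induction fuel generalizing l with
  | zero =>
    have : l = [] := by cases l <;> simp_all
    subst this; rfl
  | succ fuel ih =>
    by_cases hin : PySem.Chars.isIn [a, a] l = true
    · have hinf : [a, a] <:+: l := (PySem.Chars.isIn_iff_infix _ _).mp hin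
      simp only [pvCollapseA, if_pos hin]
      rw [pvReplace_eq_rep1]
      rw [ih _ (by have := pvRep1_length_lt a l hinf; omega)]
      exact pvGo_rep1 a none l
    · have hninf : ¬ [a, a] <:+: l := by
        rw [← PySem.Chars.isIn_iff_infix]; simpa using hin
      simp only [pvCollapseA, if_neg hin]
      exact (pvGo_id_of_not_infix a none l hninf (by simp)).symm

theorem pvGo_comp (a : Char) (P : Char → Bool) (p : Option Char) (l : List Char) :
    pvGo (fun c => c == a) p (pvGo P p l) = pvGo (fun c => P c || c == a) p l := by
  induction l generalizing p with
  | nil => rfl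
  | cons c t ih =>
    by_cases h1 : p = some c ∧ P c = true
    · simp only [pvGo, if_pos h1, if_pos (show p = some c ∧ (P c || c == a) = true by simp [h1.1, h1.2])]
      exact ih p
    · simp only [pvGo, if_neg h1]
      by_cases h2 : p = some c ∧ (c == a) = true
      · conv_lhs => simp only [pvGo]
        rw [if_pos h2, h2.1, ih (some c)]
        simp [h2.2]
      · conv_lhs => simp only [pvGo]
        rw [if_neg h2]
        have h3 : ¬ (p = some c ∧ (P c || c == a) = true) := by
          rintro ⟨rfl, hor⟩
          rcases Bool.or_eq_true_iff.mp hor with h | h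
          · exact h1 ⟨rfl, h⟩
          · exact h2 ⟨rfl, h⟩
        rw [if_neg h3, ih (some c)]

theorem pvGo_false (p : Option Char) (l : List Char) :
    pvGo (fun _ => false) p l = l := by
  induction l generalizing p with
  | nil => rfl
  | cons c t ih => simp [pvGo, ih]

theorem pvSet_nodup_add (s : PySem.Set Char) (x : Char) (h : s.Nodup) : (PySem.Set.add s x).Nodup := by
  unfold PySem.Set.add
  split
  · exact h
  · rename_i hc
    have hns : x ∉ s := by
      intro hm
      simp [PySem.Set.contains] at hc
      exact hc hm
    refine List.Nodup.append h (by simp) ?_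
    intro a ha hax
    simp only [List.mem_singleton] at hax
    exact hns (hax ▸ ha)

theorem pvA2 (l : List Char) (chk ans : List Char) (hnd : ans.Nodup) :
    ((l.foldl (fun (p : PySem.Set Char × PySem.Set Char) i =>
        if PySem.Set.contains p.1 i then (p.1, PySem.Set.add p.2 i) else (PySem.Set.add p.1 i, p.2))
        (chk, ans)).2.Nodup) ∧
      (∀ x, x ∈ (l.foldl (fun (p : PySem.Set Char × PySem.Set Char) i =>
        if PySem.Set.contains p.1 i then (p.1, PySem.Set.add p.2 i) else (p.1.add i, p.2))
        (chk, ans)).2 ↔ x ∈ ans ∨ (x ∈ chk ∧ x ∈ l) ∨ 2 ≤ l.count x) := by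
  induction l generalizing chk ans with
  | nil => simp [hnd]
  | cons i t ih =>
    simp only [List.foldl_cons]
    by_cases hc : PySem.Set.contains chk i = true
    · have hmem : i ∈ chk := by simpa [PySem.Set.contains] using hc
      rw [if_pos hc]
      obtain ⟨h1, h2⟩ := ih chk (PySem.Set.add ans i) (pvSet_nodup_add _ _ hnd)
      refine ⟨h1, fun x => ?_⟩
      rw [h2 x, PySem.Set.mem_add]
      have e1 : (x ∈ t) ↔ 0 < t.count x := List.count_pos_iff.symm
      simp only [List.mem_cons, List.count_cons, e1]
      by_cases hx : x = i
      · subst hx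
        have hxx : (x == x) = true := by simp
        have ha : (2 ≤ t.count x + if (x == x) = true then 1 else 0) ↔ 0 < t.count x := by
          rw [if_pos hxx]; omega
        simp only [hxx, if_pos, hmem]
        by_cases h1t : 0 < t.count x <;> simp [h1t]
      · have hix : (i == x) = false := by
          simp only [beq_eq_false_iff_ne, ne_eq]
          exact fun h => hx h.symm
        have ha : (t.count x + if (i == x) = true then 1 else 0) = t.count x := by simp [hix]
        simp only [ha, hx, false_or]
        tauto
    · have hmem : i ∉ chk := by simpa [PySem.Set.contains] using hc
      rw [if_neg hc]
      obtain ⟨h1, h2⟩ := ih (PySem.Set.add chk i) ans hnd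
      refine ⟨h1, fun x => ?_⟩
      rw [h2 x]
      have e1 : (x ∈ t) ↔ 0 < t.count x := List.count_pos_iff.symm
      have hadd : x ∈ PySem.Set.add chk i ↔ x ∈ chk ∨ x = i := PySem.Set.mem_add chk i x
      simp only [List.mem_cons, List.count_cons, e1, hadd]
      by_cases hx : x = i
      · subst hx
        have hxx : (x == x) = true := by simp
        have ha : (2 ≤ t.count x + if (x == x) = true then 1 else 0) ↔ 0 < t.count x := by
          rw [if_pos hxx]; omega
        simp only [hxx, hmem]
        by_cases h1t : 0 < t.count x <;> by_cases h2t : 2 ≤ t.count x <;>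
          simp [h1t, h2t] <;> first | tauto | omega
      · have hix : (i == x) = false := by
          simp only [beq_eq_false_iff_ne, ne_eq]
          exact fun h => hx h.symm
        have ha : (t.count x + if (i == x) = true then 1 else 0) = t.count x := by simp [hix]
        simp only [ha, hx, or_false, false_or]
        try tauto

theorem pvFoldl_collapse (letters : List Char) (P : Char → Bool) (l : List Char) :
    letters.foldl (fun s a => pvCollapseA a s.length s) (pvGo P none l)
      = pvGo (fun c => P c || letters.contains c) none l := by
  induction letters generalizing P with
  | nil =>
    have : (fun c => P c || List.contains [] c) = P := by funext c; simp
    rw [this]; rfl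
  | cons a rest ih =>
    simp only [List.foldl_cons]
    rw [pvCollapseA_eq_go a _ _ le_rfl, pvGo_comp, ih]
    have : (fun c => (P c || c == a) || rest.contains c) = (fun c => P c || (a :: rest).contains c) := by
      funext c
      simp only [List.contains_cons]
      rw [Bool.or_assoc]
    rw [this]

theorem pvPyGet_neg_one (l : List Char) : PySem.List.pyGet? l (-1) = l.getLast? := by
  simp only [PySem.List.pyGet?, PySem.List.pyIdx?]
  cases l with
  | nil => simp
  | cons c t => simp [List.getLast?_eq_getElem?]

theorem pvFoldlB_eq_go (l acc : List Char) :
    l.foldl (fun acc c =>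
      if acc ≠ [] ∧ PySem.List.pyGet? acc (-1) = some c ∧ pvAlphaB.contains c then acc
      else acc ++ [c]) acc
    = acc ++ pvGo (fun c => pvAlphaB.contains c) acc.getLast? l := by
  simp only [pvPyGet_neg_one]
  induction l generalizing acc with
  | nil => simp [pvGo]
  | cons c t ih =>
    simp only [List.foldl_cons]
    by_cases hcond : acc.getLast? = some c ∧ pvAlphaB.contains c = true
    · have hne : acc ≠ [] := by
        intro h; rw [h] at hcond; simp at hcond
      rw [if_pos ⟨hne, hcond.1, hcond.2⟩, ih]
      conv_rhs => rw [pvGo, if_pos hcond]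
    · have : ¬ (acc ≠ [] ∧ acc.getLast? = some c ∧ pvAlphaB.contains c = true) := by
        rintro ⟨h1, h2, h3⟩; exact hcond ⟨h2, h3⟩
      rw [if_neg this, ih]
      conv_rhs => rw [pvGo, if_neg hcond]
      simp

-- ===== VERDICT (by name: the statement is the Claim_ definition above) =====
theorem solution_spec : Claim_equal_solution := by
  intro s _
  unfold Spec_solution solution solution_alt
  obtain ⟨hA1, hB1⟩ : pvAlphaA.foldl (fun s a => pvCollapseA a s.length s) s.toList
        = pvGo (fun c => pvAlphaB.contains c) none s.toList ∧
      s.toList.foldl (fun acc c =>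
          if acc ≠ [] ∧ PySem.List.pyGet? acc (-1) = some c ∧ pvAlphaB.contains c then acc
          else acc ++ [c]) []
        = pvGo (fun c => pvAlphaB.contains c) none s.toList := by
    constructor
    · conv_lhs => rw [show s.toList = pvGo (fun _ => false) none s.toList from (pvGo_false none s.toList).symm]
      rw [pvFoldl_collapse]
      have hpq : (fun c => false || pvAlphaA.contains c) = (fun c => pvAlphaB.contains c) := by
        funext c
        simp [pvAlphaA, pvAlphaB]
      rw [hpq]
    · rw [pvFoldlB_eq_go]
      simp
  rw [hA1, hB1]
  set L := pvGo (fun c => pvAlphaB.contains c) none s.toList with hL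
  dsimp only
  simp only [PySem.Set.empty]
  obtain ⟨hnd, hmem⟩ := pvA2 L [] [] List.nodup_nil
  rw [PySem.Dict.foldl_insert_getD_add_one_eq_counter]
  have hR : ((PySem.Dict.counter L).items.filter (fun p => decide (2 ≤ p.2))).map Prod.fst
      = (PySem.Set.ofList L).filter (fun k => decide (2 ≤ (L.count k : Int))) := by
    rw [PySem.Dict.items_counter, List.filter_map, List.map_map]
    simp [Function.comp_def]
  rw [hR]
  have hndR : ((PySem.Set.ofList L).filter (fun k => decide (2 ≤ (L.count k : Int)))).Nodup :=
    (PySem.Set.nodup_ofList L).filter _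
  have hmemR : ∀ x, x ∈ (PySem.Set.ofList L).filter (fun k => decide (2 ≤ (L.count k : Int)))
      ↔ 2 ≤ L.count x := by
    intro x
    rw [List.mem_filter, PySem.Set.mem_ofList]
    constructor
    · rintro ⟨_, h⟩
      have : (2 : Int) ≤ (L.count x : Int) := by simpa using h
      exact_mod_cast this
    · intro h
      refine ⟨List.count_pos_iff.mp (by omega), by simp; exact_mod_cast h⟩
  have hperm : ((L.foldl (fun (p : PySem.Set Char × PySem.Set Char) i =>
        if PySem.Set.contains p.1 i then (p.1, PySem.Set.add p.2 i) else (PySem.Set.add p.1 i, p.2))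
        (([] : PySem.Set Char), ([] : PySem.Set Char))).2).Perm
      ((PySem.Set.ofList L).filter (fun k => decide (2 ≤ (L.count k : Int)))) := by
    rw [List.perm_ext_iff_of_nodup hnd hndR]
    intro x
    rw [hmem x, hmemR x]
    simp
  rw [PySem.List.sorted_eq_sorted_of_perm _ _ (fun x => x) (fun a b h => h) hperm]
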